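-- pv_equiv track=rewrite | github.com/jinghuaswsx/AutoVideoSrtLocal | appcore/push_quality_checks.py | aggregate_status
-- ===== SOURCE A (Python) =====
-- from typing import Any
--
-- _CHECK_STATUSES = {"passed", "warning", "failed", "error"}
--
-- def _coerce_status(value: Any) -> str:
--     status = str(value or "").strip().lower()
--     return status if status in _CHECK_STATUSES else "error"
--
-- def aggregate_status(results: list[dict[str, Any]]) -> str:
--     statuses = [_coerce_status((item or {}).get("status")) for item in results]
--     if any(status == "error" for status in statuses):
--         return "error"
--     if any(status == "failed" for status in statuses):
--         return "failed"
--     if any(status == "warning" for status in statuses):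
--         return "warning"
--     return "passed"
-- ===== SOURCE B (Python) =====
-- from typing import Any
--
-- _CHECK_STATUSES = {"passed", "warning", "failed", "error"}
--
-- def _coerce_status(value: Any) -> str:
--     status = str(value or "").strip().lower()
--     return status if status in _CHECK_STATUSES else "error"
--
-- _RANK = {"passed": 0, "warning": 1, "failed": 2, "error": 3}
-- _NAMES = ["passed", "warning", "failed", "error"]
--
-- def aggregate_status(results: list[dict[str, Any]]) -> str:
--     best = 0
--     for item in results:
--         best = max(best, _RANK[_coerce_status((item or {}).get("status"))])
--     return _NAMES[best]
-- ===== Notes on version B (the rewrite author's own statement) =====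
-- stated objective: simpler
-- what changed: Replaced the three-scan any-chain over an intermediate status list by a single fold that keeps the maximum severity rank and maps it back to a name.
import Mathlib
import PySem

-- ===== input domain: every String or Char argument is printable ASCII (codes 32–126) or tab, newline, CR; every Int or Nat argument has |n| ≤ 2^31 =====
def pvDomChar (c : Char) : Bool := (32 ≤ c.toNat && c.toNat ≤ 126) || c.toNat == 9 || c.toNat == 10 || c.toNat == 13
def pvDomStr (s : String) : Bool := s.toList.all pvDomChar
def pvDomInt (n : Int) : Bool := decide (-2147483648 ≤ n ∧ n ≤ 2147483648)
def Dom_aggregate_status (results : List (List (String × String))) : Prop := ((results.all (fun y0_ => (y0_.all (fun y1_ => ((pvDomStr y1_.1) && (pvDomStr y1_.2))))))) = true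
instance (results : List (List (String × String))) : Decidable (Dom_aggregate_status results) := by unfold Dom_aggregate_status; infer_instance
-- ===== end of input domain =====

-- B replaces A's three any-scans over the coerced status list by a single fold keeping
-- the maximum severity rank, mapped back to a name (objective: simpler, one pass).


-- ===== PORT A =====
-- _coerce_status(value): str(value or "").strip().lower(), fall back to "error" if not a known status
def pvCoerce (value : Option String) : String :=
  let status := PySem.Str.lower (PySem.Str.strip (value.getD ""))
  if status == "passed" || status == "warning" || status == "failed" || status == "error"
    then status else "error"

-- _coerce_status((item or {}).get("status"))  (an empty dict is falsy → {})
def pvItemStatus (item : List (String × String)) : String :=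
  pvCoerce ((PySem.Dict.mk (if item.isEmpty then [] else item)).get? "status")

def aggregate_status (results : List (List (String × String))) : String :=
  let statuses := results.map pvItemStatus
  if statuses.any (· == "error") then "error"
  else if statuses.any (· == "failed") then "failed"
  else if statuses.any (· == "warning") then "warning"
  else "passed"

-- ===== PORT B =====
def pvRankDict : PySem.Dict String Nat :=
  PySem.Dict.mk [("passed", 0), ("warning", 1), ("failed", 2), ("error", 3)]

def pvNames : List String := ["passed", "warning", "failed", "error"]

-- _RANK[...] always hits a key (coercion returns one of the four names), so .getD 0 is exact;
-- _NAMES[best] is always in range (best ≤ 3), so List.getD is exact.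
def aggregate_status_alt (results : List (List (String × String))) : String :=
  let best := results.foldl
    (fun best item => max best ((PySem.Dict.get? pvRankDict (pvItemStatus item)).getD 0)) 0
  pvNames.getD best ""

-- ===== PRECONDITION & SPEC =====
def Spec_aggregate_status (results : List (List (String × String))) (out : String) : Prop := out = aggregate_status_alt results
instance (results : List (List (String × String))) (out : String) : Decidable (Spec_aggregate_status results out) := by unfold Spec_aggregate_status; infer_instance

-- ===== CLAIM (what is proved, stated in full; the proofs are below) =====
def Claim_equal_aggregate_status : Prop := ∀ (results : List (List (String × String))), Dom_aggregate_status results → Spec_aggregate_status results (aggregate_status results)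

-- ===== LEMMAS AND PROOFS =====
def pvRankOf (item : List (String × String)) : Nat :=
  (PySem.Dict.get? pvRankDict (pvItemStatus item)).getD 0

lemma pvCoerce_cases (v : Option String) :
    pvCoerce v = "passed" ∨ pvCoerce v = "warning" ∨
    pvCoerce v = "failed" ∨ pvCoerce v = "error" := by
  unfold pvCoerce
  dsimp only
  generalize PySem.Str.lower (PySem.Str.strip (v.getD "")) = s
  by_cases h : (s == "passed" || s == "warning" || s == "failed" || s == "error") = true
  · rw [if_pos h]
    simp only [Bool.or_eq_true, beq_iff_eq] at h
    tauto
  · rw [if_neg h]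
    tauto

lemma pvItemStatus_cases (item : List (String × String)) :
    pvItemStatus item = "passed" ∨ pvItemStatus item = "warning" ∨
    pvItemStatus item = "failed" ∨ pvItemStatus item = "error" := by
  unfold pvItemStatus; exact pvCoerce_cases _

lemma pvFoldl_max (l : List (List (String × String))) (n : Nat) :
    l.foldl (fun b i => max b (pvRankOf i)) n
      = max n (l.foldl (fun b i => max b (pvRankOf i)) 0) := by
  induction l generalizing n with
  | nil => simp
  | cons x l ih =>
    simp only [List.foldl_cons]
    rw [ih (max n (pvRankOf x)), ih (max 0 (pvRankOf x))]
    omega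

lemma pvMax_eq (l : List (List (String × String))) :
    l.foldl (fun b i => max b (pvRankOf i)) 0
      = (if (l.map pvItemStatus).any (· == "error") then 3
         else if (l.map pvItemStatus).any (· == "failed") then 2
         else if (l.map pvItemStatus).any (· == "warning") then 1
         else 0) := by
  induction l with
  | nil => simp
  | cons x l ih =>
    rw [List.foldl_cons, pvFoldl_max, ih]
    simp only [List.map_cons, List.any_cons]
    rcases pvItemStatus_cases x with h | h | h | h <;>
      simp [pvRankOf, h, pvRankDict, PySem.Dict.get?] <;> split_ifs <;> omega

-- ===== VERDICT (by name: the statement is the Claim_ definition above) =====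
theorem aggregate_status_spec : Claim_equal_aggregate_status := by
  intro results _
  unfold Spec_aggregate_status aggregate_status aggregate_status_alt
  dsimp only
  rw [show (fun best item => max best ((PySem.Dict.get? pvRankDict (pvItemStatus item)).getD 0))
        = (fun b i => max b (pvRankOf i)) from rfl, pvMax_eq]
  split_ifs <;> rfl
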